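-- pv_equiv track=rewrite | github.com/torrac9/Algorithm | 프로그래머스/0/181932. 코드 처리하기/코드 처리하기.py | solution
-- ===== SOURCE A (Python) =====
-- def solution(code):
--     answer = ''
--     mode = 0
--     for i in range(len(code)):
--         if not mode and code[i] != '1':
--             if not i%2:
--                 answer += code[i]
--         elif mode and code[i] !='1':
--             if i%2:
--                 answer += code[i]
--         if code[i] == '1':
--             mode = not mode
--     return answer if answer else "EMPTY"
-- ===== SOURCE B (Python) =====
-- def solution(code):
--     out = []
--     pos = 0
--     for j, seg in enumerate(code.split('1')):
--         for ch in seg: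
--             if pos % 2 == j % 2:
--                 out.append(ch)
--             pos += 1
--         pos += 1  # the consumed '1' separator
--     return ''.join(out) or "EMPTY"
-- ===== Notes on version B (the rewrite author's own statement) =====
-- stated objective: alternative
-- what changed: B replaces A's per-character mode-toggling state machine by splitting the code on the separator character into segments and keeping each segment's characters whose global position parity matches the segment index parity.
import Mathlib
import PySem

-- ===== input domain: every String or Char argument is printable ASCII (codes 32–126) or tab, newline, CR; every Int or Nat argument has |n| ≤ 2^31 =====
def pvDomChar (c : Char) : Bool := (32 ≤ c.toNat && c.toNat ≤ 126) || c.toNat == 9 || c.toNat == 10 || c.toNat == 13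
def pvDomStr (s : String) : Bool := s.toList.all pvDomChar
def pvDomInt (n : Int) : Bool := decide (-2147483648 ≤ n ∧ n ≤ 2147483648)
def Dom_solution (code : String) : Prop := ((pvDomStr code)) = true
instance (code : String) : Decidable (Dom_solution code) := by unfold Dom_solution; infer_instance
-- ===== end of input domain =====

-- B replaces A's per-character mode-toggling state machine by split-on-'1' segments
-- filtered by position/segment-index parity (alternative decomposition, same O(n) cost).


-- ===== PORT A =====
-- A: single pass with index i, accumulator `answer` and a Boolean `mode`
-- toggled on each '1'; keeps code[i] when parity of i matches the mode.
def solutionLoopA : List Char → Nat → Bool → List Char → List Char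
  | [], _, _, answer => answer
  | c :: cs, i, mode, answer =>
      let answer :=
        if mode = false ∧ c ≠ '1' then
          (if i % 2 = 0 then answer ++ [c] else answer)
        else if mode = true ∧ c ≠ '1' then
          (if i % 2 = 1 then answer ++ [c] else answer)
        else answer
      let mode := if c = '1' then !mode else mode
      solutionLoopA cs (i + 1) mode answer

def solution (code : String) : String :=
  let answer := solutionLoopA code.toList 0 false []
  if answer = [] then "EMPTY" else String.ofList answer

-- ===== PORT B =====
-- B: split on '1'; hand port of str.split('1') over List Char.
def solutionSplit1 : List Char → List (List Char)
  | [] => [[]]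
  | c :: cs =>
      if c = '1' then [] :: solutionSplit1 cs
      else
        match solutionSplit1 cs with
        | [] => [[c]]   -- unreachable: solutionSplit1 never returns []
        | s :: ss => (c :: s) :: ss

-- inner loop over one segment: keep ch when pos % 2 == j % 2
def solutionKeepSeg : List Char → Nat → Nat → List Char
  | [], _, _ => []
  | c :: s, pos, j =>
      (if pos % 2 = j % 2 then [c] else []) ++ solutionKeepSeg s (pos + 1) j

-- outer loop over segments with state (out, j, pos)
def solutionLoopB : List (List Char) → List Char × Nat × Nat → List Char × Nat × Nat
  | [], st => st
  | seg :: segs, (out, j, pos) =>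
      solutionLoopB segs (out ++ solutionKeepSeg seg pos j, j + 1, pos + seg.length + 1)

def solution_alt (code : String) : String :=
  let res := solutionLoopB (solutionSplit1 code.toList) ([], 0, 0)
  if res.1 = [] then "EMPTY" else String.ofList res.1

-- ===== PRECONDITION & SPEC =====
def Spec_solution (code : String) (out : String) : Prop := out = solution_alt code
instance (code : String) (out : String) : Decidable (Spec_solution code out) := by unfold Spec_solution; infer_instance

-- ===== CLAIM (what is proved, stated in full; the proofs are below) =====
def Claim_equal_solution : Prop := ∀ (code : String), Dom_solution code → Spec_solution code (solution code)

-- ===== LEMMAS AND PROOFS =====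
theorem solution_main : ∀ (cs : List Char) (acc : List Char) (j pos : Nat),
    solutionLoopA cs pos (decide (j % 2 = 1)) acc
      = (solutionLoopB (solutionSplit1 cs) (acc, j, pos)).1 := by
  intro cs
  induction cs with
  | nil =>
      intro acc j pos
      simp [solutionLoopA, solutionSplit1, solutionLoopB, solutionKeepSeg]
  | cons c cs ih =>
      intro acc j pos
      by_cases hc : c = '1'
      · subst hc
        have h1 : solutionLoopA ('1' :: cs) pos (decide (j % 2 = 1)) acc
            = solutionLoopA cs (pos + 1) (!decide (j % 2 = 1)) acc := by
          simp [solutionLoopA]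
        have hb : (!decide (j % 2 = 1)) = decide ((j + 1) % 2 = 1) := by
          rcases Nat.mod_two_eq_zero_or_one j with h | h <;> simp [Nat.add_mod, *]
        rw [h1, hb, ih]
        simp [solutionSplit1, solutionLoopB, solutionKeepSeg]
      · have hsplit : ∃ s ss, solutionSplit1 cs = s :: ss := by
          cases cs with
          | nil => exact ⟨[], [], rfl⟩
          | cons d ds =>
              unfold solutionSplit1
              by_cases hd : d = '1'
              · exact ⟨[], solutionSplit1 ds, by simp [hd]⟩
              · cases h : solutionSplit1 ds with
                | nil => exact ⟨[d], [], by simp [hd]⟩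
                | cons s ss => exact ⟨d :: s, ss, by simp [hd]⟩
        obtain ⟨s, ss, hs⟩ := hsplit
        have hA : solutionLoopA (c :: cs) pos (decide (j % 2 = 1)) acc
            = solutionLoopA cs (pos + 1) (decide (j % 2 = 1))
                (if pos % 2 = j % 2 then acc ++ [c] else acc) := by
          rcases Nat.mod_two_eq_zero_or_one j with h | h <;>
            rcases Nat.mod_two_eq_zero_or_one pos with h2 | h2 <;>
            simp [solutionLoopA, hc, h, h2]
        have hB : solutionSplit1 (c :: cs) = (c :: s) :: ss := by
          simp [solutionSplit1, hc, hs]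
        rw [hA, hB, ih]
        rw [hs]
        simp only [solutionLoopB, solutionKeepSeg, List.length_cons]
        have : (if pos % 2 = j % 2 then acc ++ [c] else acc)
              ++ solutionKeepSeg s (pos + 1) j
            = acc ++ ((if pos % 2 = j % 2 then [c] else [])
              ++ solutionKeepSeg s (pos + 1) j) := by
          split_ifs <;> simp
        rw [this]
        ring_nf

-- ===== VERDICT (by name: the statement is the Claim_ definition above) =====
theorem solution_spec : Claim_equal_solution := by
  intro code _
  unfold Spec_solution solution solution_alt
  have := solution_main code.toList [] 0 0
  simpa using this.symm ▸ rfl
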